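-- pv_equiv track=rewrite | github.com/netopier0/AoC_Adventures | AdventOfCode2024/day21.py | numToKey
-- ===== SOURCE A (Python) =====
-- def numToKey(nums):
--     coords = {"7": (0,0), "8":(0,1), "9":(0,2),
--               "4": (1,0), "5":(1,1), "6":(1,2),
--               "1": (2,0), "2":(2,1), "3":(2,2),
--                           "0":(3,1), "A":(3,2)}
--     res = ""
--     currY = 3
--     currX = 2
--     for n in nums:
--         #Hover Over invalid check
--         if currY == 3 and coords[n][1] == 0 or currX == 0 and coords[n][0] == 3:
--             if coords[n][0] < currY:
--                 res += "^"*(currY - coords[n][0])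
--             if coords[n][1] < currX:
--                 res += "<"*(currX - coords[n][1])
--             if coords[n][1] > currX:
--                 res += ">"*(coords[n][1] - currX)
--             if coords[n][0] > currY:
--                 res += "v"*(coords[n][0] - currY)
--         else:
--             if coords[n][1] < currX:
--                 res += "<"*(currX - coords[n][1])
--             if coords[n][0] < currY:
--                 res += "^"*(currY - coords[n][0])
--             if coords[n][0] > currY:
--                 res += "v"*(coords[n][0] - currY)
--             if coords[n][1] > currX:
--                 res += ">"*(coords[n][1] - currX)
--         res += "A"
--         currY, currX = coords[n]
--     return res
-- ===== SOURCE B (Python) =====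
-- def numToKey(nums):
--     coords = {"7": (0,0), "8":(0,1), "9":(0,2),
--               "4": (1,0), "5":(1,1), "6":(1,2),
--               "1": (2,0), "2":(2,1), "3":(2,2),
--                           "0":(3,1), "A":(3,2)}
--
--     def seg(a, b):
--         y, x = coords[a]
--         ty, tx = coords[b]
--         moves = ("^" * max(0, y - ty) + "v" * max(0, ty - y) +
--                  "<" * max(0, x - tx) + ">" * max(0, tx - x))
--         # priority order of move kinds: gap-avoiding order when the straight
--         # grouping would pass over the keypad's empty corner
--         order = "^<>v" if (y == 3 and tx == 0) or (x == 0 and ty == 3) else "<^v>"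
--         return "".join(sorted(moves, key=order.index)) + "A"
--
--     table = {(a, b): seg(a, b) for a in coords for b in coords}
--     return "".join(table[(a, b)] for a, b in zip("A" + nums, nums))
-- ===== Notes on version B (the rewrite author's own statement) =====
-- stated objective: alternative
-- what changed: B precomputes a full (prev,cur)->segment transition table - each segment formed by stably sorting the move multiset under a priority order instead of A's two interleaved four-way if-chains - and reduces the main loop to table lookups over zip('A'+nums, nums).
-- outside the precondition, e.g. on numToKey('5x'): A raises KeyError, B raises KeyError
import Mathlib
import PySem

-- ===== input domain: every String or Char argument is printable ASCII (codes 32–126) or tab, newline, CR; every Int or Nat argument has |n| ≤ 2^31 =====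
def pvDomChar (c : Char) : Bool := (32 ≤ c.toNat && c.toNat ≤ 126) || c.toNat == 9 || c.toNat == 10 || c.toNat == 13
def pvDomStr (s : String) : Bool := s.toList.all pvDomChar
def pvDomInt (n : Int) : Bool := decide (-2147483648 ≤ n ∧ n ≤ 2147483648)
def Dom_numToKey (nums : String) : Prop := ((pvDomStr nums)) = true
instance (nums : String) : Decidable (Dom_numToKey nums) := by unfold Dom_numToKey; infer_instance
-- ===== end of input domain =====

-- B precomputes a (prev,cur) → segment transition table (segments formed by a stable
-- sort of the move multiset under a priority order) and reduces the main loop to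
-- table lookups over the zipped key pairs (objective: alternative).

set_option maxRecDepth 8000
set_option maxHeartbeats 2000000

-- ===== PORT A =====

-- A's numeric keypad coordinate table
def nkCoords : PySem.Dict Char (Int × Int) :=
  PySem.Dict.ofList [('7',(0,0)), ('8',(0,1)), ('9',(0,2)),
                     ('4',(1,0)), ('5',(1,1)), ('6',(1,2)),
                     ('1',(2,0)), ('2',(2,1)), ('3',(2,2)),
                     ('0',(3,1)), ('A',(3,2))]

-- "c"*(n)  for n ≥ 0 (A only multiplies by guarded-positive counts)
def nkRep (c : Char) (n : Int) : String := String.ofList (List.replicate n.toNat c)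

-- the string A's loop body appends for one key, before the final "A"
def nkSegA (y x ty tx : Int) : String :=
  if (y == 3 && tx == 0) || (x == 0 && ty == 3) then
    (if ty < y then nkRep '^' (y - ty) else "") ++
    (if tx < x then nkRep '<' (x - tx) else "") ++
    (if tx > x then nkRep '>' (tx - x) else "") ++
    (if ty > y then nkRep 'v' (ty - y) else "")
  else
    (if tx < x then nkRep '<' (x - tx) else "") ++
    (if ty < y then nkRep '^' (y - ty) else "") ++
    (if ty > y then nkRep 'v' (ty - y) else "") ++
    (if tx > x then nkRep '>' (tx - x) else "")

-- A's loop: accumulator res, state (currY, currX); none = KeyError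
def nkGoA (l : List Char) (res : String) (y x : Int) : Option String :=
  match l with
  | [] => some res
  | n :: rest =>
    match nkCoords.get? n with
    | none => none
    | some (ty, tx) => nkGoA rest (res ++ nkSegA y x ty tx ++ "A") ty tx

def numToKey (nums : String) : String :=
  match nkGoA nums.toList "" 3 2 with
  | some r => r
  | none => ""   -- unreachable under Pre_ (Python raises KeyError here)

-- ===== PORT B =====

-- Source B's seg(a,b) (Source B re-declares the same literal coords table; nkCoords is that data):
-- move multiset, stable sort by the priority order's index, then "A".
-- a and b are always keys of the table here (the comprehension draws them from coords),
-- so the .getD default is never used.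
def nkSegB (a b : Char) : String :=
  let p := (nkCoords.get? a).getD (0, 0)
  let q := (nkCoords.get? b).getD (0, 0)
  let moves : List Char :=
    List.replicate (max 0 (p.1 - q.1)).toNat '^' ++
    List.replicate (max 0 (q.1 - p.1)).toNat 'v' ++
    List.replicate (max 0 (p.2 - q.2)).toNat '<' ++
    List.replicate (max 0 (q.2 - p.2)).toNat '>'
  let order : List Char :=
    if (p.1 == 3 && q.2 == 0) || (p.2 == 0 && q.1 == 3) then "^<>v".toList else "<^v>".toList
  String.ofList (PySem.List.sorted moves (fun c => order.idxOf c) false) ++ "A"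

-- Source B's table: {(a, b): seg(a, b) for a in coords for b in coords}
def nkTable : PySem.Dict (Char × Char) String :=
  PySem.Dict.ofList
    (nkCoords.keys.flatMap (fun a => nkCoords.keys.map (fun b => ((a, b), nkSegB a b))))

-- the join'ed generator: look each pair up in the table; none = KeyError
def nkLookups (pairs : List (Char × Char)) : Option (List String) :=
  match pairs with
  | [] => some []
  | p :: rest =>
    match nkTable.get? p with
    | none => none
    | some s =>
      match nkLookups rest with
      | none => none
      | some t => some (s :: t)

def numToKey_alt (nums : String) : String :=
  match nkLookups (List.zip ('A' :: nums.toList) nums.toList) with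
  | some segs => PySem.Str.join "" segs
  | none => ""   -- unreachable under Pre_ (Python raises KeyError here)

-- ===== PRECONDITION & SPEC =====
-- Pre_ excludes exactly the inputs containing a character outside the keypad,
-- on which Python A raises KeyError (B raises there too).
def Pre_numToKey (nums : String) : Prop :=
  nums.toList.all (fun c => ['0','1','2','3','4','5','6','7','8','9','A'].contains c) = true
instance (nums : String) : Decidable (Pre_numToKey nums) := by unfold Pre_numToKey; infer_instance
def pvWitness_numToKey : String := "029A"

def Spec_numToKey (nums : String) (out : String) : Prop := out = numToKey_alt nums
instance (nums : String) (out : String) : Decidable (Spec_numToKey nums out) := by unfold Spec_numToKey; infer_instance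

-- ===== CLAIM (what is proved, stated in full; the proofs are below) =====
def Claim_equal_numToKey : Prop := ∀ (nums : String), Dom_numToKey nums → Pre_numToKey nums → Spec_numToKey nums (numToKey nums)

-- ===== LEMMAS AND PROOFS =====

-- the valid keypad characters (Pre_'s order, and the coords-table key order)
def nkKeys : List Char := ['0','1','2','3','4','5','6','7','8','9','A']
def nkKeysO : List Char := ['7','8','9','4','5','6','1','2','3','0','A']

-- the coordinate table in literal (mk) form, for cheap evaluation
def nkCoordsM : PySem.Dict Char (Int × Int) :=
  PySem.Dict.mk [('7',(0,0)), ('8',(0,1)), ('9',(0,2)),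
                 ('4',(1,0)), ('5',(1,1)), ('6',(1,2)),
                 ('1',(2,0)), ('2',(2,1)), ('3',(2,2)),
                 ('0',(3,1)), ('A',(3,2))]

lemma nk_hAM : nkCoords = nkCoordsM := PySem.Dict.ext (by decide)

-- nkSegB phrased over the literal table
def nkSegM (a b : Char) : String :=
  let p := (nkCoordsM.get? a).getD (0, 0)
  let q := (nkCoordsM.get? b).getD (0, 0)
  let moves : List Char :=
    List.replicate (max 0 (p.1 - q.1)).toNat '^' ++
    List.replicate (max 0 (q.1 - p.1)).toNat 'v' ++
    List.replicate (max 0 (p.2 - q.2)).toNat '<' ++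
    List.replicate (max 0 (q.2 - p.2)).toNat '>'
  let order : List Char :=
    if (p.1 == 3 && q.2 == 0) || (p.2 == 0 && q.1 == 3) then "^<>v".toList else "<^v>".toList
  String.ofList (PySem.List.sorted moves (fun c => order.idxOf c) false) ++ "A"

lemma nk_segBM (a b : Char) : nkSegB a b = nkSegM a b := by
  simp only [nkSegB, nkSegM, nk_hAM]

-- what A appends per key, phrased on characters over the literal table
def nkStepM (a b : Char) : String :=
  match nkCoordsM.get? a, nkCoordsM.get? b with
  | some (y, x), some (ty, tx) => nkSegA y x ty tx ++ "A"
  | _, _ => ""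

-- the per-key strings of the two ports agree on all 121 key pairs (Bool form, then Prop)
lemma nk_stepM_b : (nkKeysO.all fun a => nkKeysO.all fun b => nkSegM a b == nkStepM a b) = true := by
  decide

lemma nk_stepM_eq : ∀ a ∈ nkKeysO, ∀ b ∈ nkKeysO, nkSegM a b = nkStepM a b := by
  intro a ha b hb
  exact eq_of_beq (List.all_eq_true.mp (List.all_eq_true.mp nk_stepM_b a ha) b hb)

lemma nk_keys_mem_b : (nkKeys.all fun c => nkKeysO.contains c) = true := by decide

lemma nk_keys_mem : ∀ c ∈ nkKeys, c ∈ nkKeysO := by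
  intro c hc
  simpa using List.all_eq_true.mp nk_keys_mem_b c hc

lemma nk_getM_b : (nkKeysO.all fun c => (nkCoordsM.get? c).isSome) = true := by decide

lemma nk_getM_isSome : ∀ c ∈ nkKeysO, (nkCoordsM.get? c).isSome = true := fun c hc =>
  List.all_eq_true.mp nk_getM_b c hc

lemma nk_join_cons (s : String) (segs : List String) :
    PySem.Str.join "" (s :: segs) = s ++ PySem.Str.join "" segs := by
  cases segs with
  | nil => simp [PySem.Str.join, PySem.Chars.join_singleton, PySem.Chars.join_nil]
  | cons t ts => simp [PySem.Str.join, PySem.Chars.join_cons_cons]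

-- get? is find? over the items list
lemma nk_get?_eq {κ ν : Type} [BEq κ] (d : PySem.Dict κ ν) (x : κ) :
    d.get? x = (d.items.find? (fun p => p.1 == x)).map Prod.snd := rfl

-- ofList is a left fold of inserts over the empty dict
lemma nk_ofList_eq {κ ν : Type} [BEq κ] (l : List (κ × ν)) :
    PySem.Dict.ofList l = l.foldl (fun d p => d.insert p.1 p.2) PySem.Dict.empty := rfl

lemma nk_keysB : nkCoords.keys = nkKeysO := by rw [nk_hAM]; decide

-- the big product list behind nkTable
def nkBigL : List ((Char × Char) × String) :=
  nkKeysO.flatMap (fun a => nkKeysO.map (fun b => ((a, b), nkSegB a b)))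

lemma nk_bigL_keys_nodup : (nkBigL.map Prod.fst).Nodup := by
  unfold nkBigL
  simp only [List.map_flatMap, List.map_map]
  decide

lemma nk_items_table : nkTable.items = nkBigL := by
  unfold nkTable nkBigL
  rw [nk_keysB, nk_ofList_eq]
  have h := PySem.Dict.items_foldl_insert_fresh
    (l := nkKeysO.flatMap (fun a => nkKeysO.map (fun b => ((a, b), nkSegB a b))))
    (k := Prod.fst) (v := Prod.snd) (d := PySem.Dict.empty)
    (by intro a _; simp [PySem.Dict.contains_empty])
    (by exact nk_bigL_keys_nodup)
  simpa using h

-- find? in one block of the product list: key mismatch on the first component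
lemma nk_find?_block (x : Char) (kb : List Char) (a b : Char) (hx : x ≠ a)
    (f : Char → Char → String) :
    ((kb.map (fun y => ((x, y), f x y))).find? (fun p => p.1 == (a, b))) = none := by
  apply List.find?_eq_none.mpr
  intro p hp
  obtain ⟨y, _, rfl⟩ := List.mem_map.mp hp
  simp [Prod.ext_iff, hx]

-- find? in the matching block: first entry with second component b
lemma nk_find?_inner (x : Char) (kb : List Char) (b : Char) (hb : b ∈ kb)
    (f : Char → Char → String) :
    ((kb.map (fun y => ((x, y), f x y))).find? (fun p => p.1 == (x, b))) =
      some ((x, b), f x b) := by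
  induction kb with
  | nil => cases hb
  | cons y t ih =>
    by_cases hyb : y = b
    · subst hyb
      simp [List.find?_cons_of_pos]
    · have hb' : b ∈ t := by
        cases List.mem_cons.mp hb with
        | inl h => exact absurd h.symm hyb
        | inr h => exact h
      rw [List.map_cons, List.find?_cons_of_neg, ih hb']
      simp [Prod.ext_iff, hyb]

lemma nk_find?_prod (ka kb : List Char) (a b : Char) (ha : a ∈ ka) (hb : b ∈ kb)
    (f : Char → Char → String) :
    ((ka.flatMap (fun x => kb.map (fun y => ((x, y), f x y)))).find?
        (fun p => p.1 == (a, b))) = some ((a, b), f a b) := by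
  induction ka with
  | nil => cases ha
  | cons x t ih =>
    rw [List.flatMap_cons, List.find?_append]
    by_cases hxa : x = a
    · subst hxa
      rw [nk_find?_inner x kb b hb f]
      rfl
    · rw [nk_find?_block x kb a b hxa f]
      have ha' : a ∈ t := by
        cases List.mem_cons.mp ha with
        | inl h => exact absurd h.symm hxa
        | inr h => exact h
      rw [ih ha']
      rfl

lemma nk_tbl_eq (a b : Char) (ha : a ∈ nkKeysO) (hb : b ∈ nkKeysO) :
    nkTable.get? (a, b) = some (nkSegB a b) := by
  rw [nk_get?_eq, nk_items_table]
  unfold nkBigL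
  rw [nk_find?_prod nkKeysO nkKeysO a b ha hb nkSegB]
  rfl

lemma nk_main : ∀ (l : List Char) (res : String) (prev : Char) (y x : Int),
    nkCoordsM.get? prev = some (y, x) → prev ∈ nkKeysO → (∀ c ∈ l, c ∈ nkKeysO) →
    nkGoA l res y x =
      (nkLookups (List.zip (prev :: l) l)).map (fun segs => res ++ PySem.Str.join "" segs) := by
  intro l
  induction l with
  | nil =>
    intro res prev y x _ _ _
    simp [nkGoA, nkLookups, PySem.Str.join]
  | cons n rest ih =>
    intro res prev y x hprev hpk hall
    have hn : n ∈ nkKeysO := hall n (by simp)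
    have hrest : ∀ c ∈ rest, c ∈ nkKeysO := fun c hc => hall c (by simp [hc])
    have hs : (nkCoordsM.get? n).isSome = true := nk_getM_isSome n hn
    obtain ⟨⟨ty, tx⟩, hg⟩ := Option.isSome_iff_exists.mp hs
    have hgA : nkCoords.get? n = some (ty, tx) := by rw [nk_hAM]; exact hg
    simp only [nkGoA, hgA, List.zip_cons_cons, nkLookups, nk_tbl_eq prev n hpk hn]
    rw [ih (res ++ nkSegA y x ty tx ++ "A") n ty tx hg hn hrest]
    cases h2 : nkLookups (List.zip (n :: rest) rest) with
    | none => simp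
    | some segs =>
      have hstep : nkSegB prev n = nkSegA y x ty tx ++ "A" := by
        rw [nk_segBM, nk_stepM_eq prev hpk n hn]
        simp [nkStepM, hprev, hg]
      simp only [hstep, Option.map_some, nk_join_cons, String.append_assoc]

-- ===== VERDICT (by name: the statement is the Claim_ definition above) =====
theorem numToKey_spec : Claim_equal_numToKey := by
  intro nums _ hpre
  unfold Spec_numToKey numToKey numToKey_alt
  have hall : ∀ c ∈ nums.toList, c ∈ nkKeysO := by
    intro c hc
    have := List.all_eq_true.mp hpre c hc
    exact nk_keys_mem c (by simpa [nkKeys] using this)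
  rw [nk_main nums.toList "" 'A' 3 2 (by decide) (by decide) hall]
  cases nkLookups (List.zip ('A' :: nums.toList) nums.toList) <;> simp
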